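-- pv_equiv track=rewrite | github.com/leeliangchao/AD | src/adrf/checkpoint/io.py | _module_stripped_variants
-- ===== SOURCE A (Python) =====
-- def _module_stripped_variants(key: str) -> set[str]:
--     """Generate candidate keys by removing one or more DDP-style `module` path segments."""
--
--     segments = key.split(".")
--     variants = {key}
--     frontier = [segments]
--     seen = {tuple(segments)}
--
--     while frontier:
--         current = frontier.pop()
--         for index, segment in enumerate(current):
--             if segment != "module":
--                 continue
--             candidate = current[:index] + current[index + 1 :]
--             if not candidate:
--                 continue
--             candidate_tuple = tuple(candidate)
--             if candidate_tuple in seen: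
--                 continue
--             seen.add(candidate_tuple)
--             candidate_key = ".".join(candidate)
--             variants.add(candidate_key)
--             frontier.append(candidate)
--
--     return variants
-- ===== SOURCE B (Python) =====
-- def _module_stripped_variants(key: str) -> set[str]:
--     """Generate candidate keys by removing one or more DDP-style `module` path segments."""
--
--     def expansions(segments):
--         # all segment lists obtainable by dropping any subset of the "module" segments
--         if not segments:
--             return [[]]
--         rest = expansions(segments[1:])
--         out = [[segments[0]] + tail for tail in rest]
--         if segments[0] == "module":
--             out += rest
--         return out
--
--     return {".".join(candidate) for candidate in expansions(key.split(".")) if candidate}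
-- ===== Notes on version B (the rewrite author's own statement) =====
-- stated objective: simpler
-- what changed: Replaces A's worklist BFS with frontier/seen bookkeeping by a single structural recursion over the segment list that directly generates every segment list obtainable by dropping 'module' segments, collecting the joined keys into a set.
import Mathlib
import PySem

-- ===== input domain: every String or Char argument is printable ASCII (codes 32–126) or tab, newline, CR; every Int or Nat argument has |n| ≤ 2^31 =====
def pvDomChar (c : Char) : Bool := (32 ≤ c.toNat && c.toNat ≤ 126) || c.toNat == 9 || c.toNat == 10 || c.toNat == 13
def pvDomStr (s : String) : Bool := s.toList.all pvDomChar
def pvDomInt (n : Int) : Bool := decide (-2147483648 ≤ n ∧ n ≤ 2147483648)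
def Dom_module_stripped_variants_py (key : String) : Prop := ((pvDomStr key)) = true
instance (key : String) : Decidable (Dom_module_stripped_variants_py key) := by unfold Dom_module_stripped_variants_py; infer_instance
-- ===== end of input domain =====

-- B replaces A's frontier/seen BFS by one structural recursion generating every
-- module-stripped segment list directly (objective: simpler). Both Pythons return an
-- unordered set; both ports return the set's elements sorted (a canonical order — the
-- set value itself is unchanged).

-- ===== PORT A =====

-- key.split(".") — the separator is the non-empty literal ".", for which split? is `some`
def splitDot (key : String) : List String := (PySem.Str.split? key ".").getD []

-- the inner `for index, segment in enumerate(current)` loop; collects the elements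
-- appended to `frontier` in `pushed` (they are appended to the frontier by the caller)
def innerA : List (Int × String) → List String → PySem.Set (List String) → PySem.Set String →
    List (List String) → PySem.Set (List String) × PySem.Set String × List (List String)
  | [], _, seen, variants, pushed => (seen, variants, pushed)
  | (index, segment) :: ps, current, seen, variants, pushed =>
    if segment ≠ "module" then innerA ps current seen variants pushed
    else
      -- current[:index] + current[index + 1:]
      let candidate := PySem.List.slice current none (some index) ++
        PySem.List.slice current (some (index + 1)) none
      if candidate = [] then innerA ps current seen variants pushed
      else if PySem.Set.contains seen candidate then innerA ps current seen variants pushed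
      else innerA ps current (PySem.Set.add seen candidate)
        (PySem.Set.add variants (PySem.Str.join "." candidate)) (pushed ++ [candidate])

-- termination measure for the while-loop: Σ (length + 1)! over the frontier
def muA (fr : List (List String)) : Nat := (fr.map (fun l => (l.length + 1).factorial)).sum

-- facts about innerA's pushed list, needed for loopA's termination
-- current[:k] + current[k+1:] for a natural index k
theorem candidate_eq (current : List String) (k : Nat) :
    PySem.List.slice current none (some (k : Int)) ++
      PySem.List.slice current (some ((k : Int) + 1)) none
      = current.take k ++ current.drop (k + 1) := by
  rw [PySem.List.slice_to_natCast]
  rw [show ((k : Int) + 1) = ((k + 1 : Nat) : Int) by push_cast; ring,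
    PySem.List.slice_from_natCast]

theorem innerA_pushed_len (ps : List (Int × String)) (current : List String)
    (seen : PySem.Set (List String)) (variants : PySem.Set String) (pushed : List (List String))
    (hps : ∀ p ∈ ps, ∃ k : Nat, ∃ _ : k < current.length, p = ((k : Int), current[k])) :
    (innerA ps current seen variants pushed).2.2.length ≤ pushed.length + ps.length ∧
    ∀ c ∈ (innerA ps current seen variants pushed).2.2,
      c ∈ pushed ∨ c.length + 1 = current.length := by
  induction ps generalizing seen variants pushed with
  | nil =>
    simp only [innerA]
    exact ⟨by omega, fun c hc => Or.inl hc⟩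
  | cons p ps ih =>
    obtain ⟨index, segment⟩ := p
    have hhead := hps (index, segment) (List.mem_cons_self ..)
    obtain ⟨k, hk, hpk⟩ := hhead
    have hps' : ∀ p ∈ ps, ∃ k : Nat, ∃ _ : k < current.length, p = ((k : Int), current[k]) :=
      fun p hp => hps p (List.mem_cons_of_mem _ hp)
    simp only [innerA]
    split_ifs with h1 h2 h3
    · obtain ⟨hl, hm⟩ := ih seen variants pushed hps'
      exact ⟨by simpa using Nat.le_succ_of_le hl, hm⟩
    · obtain ⟨hl, hm⟩ := ih seen variants pushed hps'
      exact ⟨by simpa using Nat.le_succ_of_le hl, hm⟩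
    · obtain ⟨hl, hm⟩ := ih seen variants pushed hps'
      exact ⟨by simpa using Nat.le_succ_of_le hl, hm⟩
    · have hind : index = (k : Int) := by simpa using congrArg Prod.fst hpk
      rw [hind, candidate_eq] at *
      obtain ⟨hl, hm⟩ := ih (PySem.Set.add seen (current.take k ++ current.drop (k + 1)))
        (PySem.Set.add variants
          (PySem.Str.join "." (current.take k ++ current.drop (k + 1))))
        (pushed ++ [current.take k ++ current.drop (k + 1)]) hps'
      refine ⟨by simp at hl ⊢; omega, fun c hc => ?_⟩
      rcases hm c hc with hcp | hcl
      · rcases List.mem_append.mp hcp with hcp | hcp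
        · exact Or.inl hcp
        · simp only [List.mem_singleton] at hcp
          subst hcp
          right
          simp
          omega
      · exact Or.inr hcl

theorem muA_dec (current : List String) (rest : List (List String))
    (seen : PySem.Set (List String)) (variants : PySem.Set String) :
    muA (rest ++ (innerA (PySem.List.enumerate current 0) current seen variants []).2.2)
      < muA (rest ++ [current]) := by
  have hps : ∀ p ∈ PySem.List.enumerate current 0,
      ∃ k : Nat, ∃ _ : k < current.length, p = ((k : Int), current[k]) := by
    intro p hp
    rw [PySem.List.mem_enumerate_iff] at hp
    obtain ⟨k, hk, rfl⟩ := hp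
    exact ⟨k, hk, by simp⟩
  obtain ⟨hl, hm⟩ := innerA_pushed_len _ _ seen variants [] hps
  set P := (innerA (PySem.List.enumerate current 0) current seen variants []).2.2 with hP
  have hlen : P.length ≤ current.length := by
    rw [PySem.List.length_enumerate] at hl
    simpa using hl
  have hmem : ∀ c ∈ P, c.length + 1 = current.length := by
    intro c hc
    rcases hm c hc with h | h
    · simp at h
    · exact h
  set n := current.length with hn
  have hsum : muA P ≤ P.length * n.factorial := by
    have : ∀ x ∈ P.map (fun l => (l.length + 1).factorial), x ≤ n.factorial := by
      intro x hx
      rw [List.mem_map] at hx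
      obtain ⟨c, hc, rfl⟩ := hx
      exact le_of_eq (by rw [hmem c hc])
    calc muA P ≤ (P.map (fun l => (l.length + 1).factorial)).length * n.factorial :=
          List.sum_le_card_nsmul _ _ this
      _ = P.length * n.factorial := by simp
  have key : muA P < (n + 1).factorial := by
    have h1 : P.length * n.factorial ≤ n * n.factorial := by
      exact Nat.mul_le_mul_right _ hlen
    have h2 : n * n.factorial < (n + 1) * n.factorial := by
      have := Nat.factorial_pos n
      exact Nat.mul_lt_mul_of_lt_of_le (by omega) (le_refl _) this
    calc muA P ≤ P.length * n.factorial := hsum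
      _ ≤ n * n.factorial := h1
      _ < (n + 1) * n.factorial := h2
      _ = (n + 1).factorial := (Nat.factorial_succ n).symm
  have hApp : ∀ (a b : List (List String)), muA (a ++ b) = muA a + muA b := by
    intro a b
    simp [muA]
  rw [hApp, hApp]
  have hcur : muA [current] = (n + 1).factorial := by simp [muA, hn]
  omega

-- the `while frontier:` loop; frontier.pop() takes the LAST element
def loopA (frontier : List (List String)) (seen : PySem.Set (List String))
    (variants : PySem.Set String) : PySem.Set String :=
  match h : frontier with
  | [] => variants
  | f :: fs =>
    let current := (f :: fs).getLast (by simp)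
    let rest := (f :: fs).dropLast
    let r := innerA (PySem.List.enumerate current 0) current seen variants []
    loopA (rest ++ r.2.2) r.1 r.2.1
termination_by muA frontier
decreasing_by
  have := muA_dec ((f :: fs).getLast (by simp)) ((f :: fs).dropLast) seen variants
  rwa [List.dropLast_append_getLast (by simp : f :: fs ≠ [])] at this

def module_stripped_variants_py (key : String) : List String :=
  let segments := splitDot key
  PySem.List.sorted
    (loopA [segments] (PySem.Set.ofList [segments]) (PySem.Set.ofList [key]))
    (fun x => x) false

-- ===== PORT B =====

-- all segment lists obtainable by dropping any subset of the "module" segments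
def expansionsB : List String → List (List String)
  | [] => [[]]
  | s :: rest' =>
    let rest := expansionsB rest'
    let out := rest.map (fun tail => s :: tail)
    if s = "module" then out ++ rest else out

def module_stripped_variants_py_alt (key : String) : List String :=
  PySem.List.sorted
    ((expansionsB (splitDot key)).foldl
      (fun acc c => if c ≠ [] then PySem.Set.add acc (PySem.Str.join "." c) else acc)
      PySem.Set.empty)
    (fun x => x) false

-- ===== PRECONDITION & SPEC =====
def Spec_module_stripped_variants_py (key : String) (out : List String) : Prop := out = module_stripped_variants_py_alt key
instance (key : String) (out : List String) : Decidable (Spec_module_stripped_variants_py key out) := by unfold Spec_module_stripped_variants_py; infer_instance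

-- ===== CLAIM (what is proved, stated in full; the proofs are below) =====
def Claim_equal_module_stripped_variants_py : Prop := ∀ (key : String), Dom_module_stripped_variants_py key → Spec_module_stripped_variants_py key (module_stripped_variants_py key)

-- ===== LEMMAS AND PROOFS =====

-- `Strip a c`: c is obtained from a by deleting some (possibly none) of its "module" elements
inductive Strip : List String → List String → Prop
  | nil : Strip [] []
  | keep (s : String) {xs c : List String} : Strip xs c → Strip (s :: xs) (s :: c)
  | drop {xs c : List String} : Strip xs c → Strip ("module" :: xs) c

-- one deletion step: delete the "module" at index k (OneStepR additionally asks a nonempty result)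
def OneStep0 (current c : List String) : Prop :=
  ∃ k : Nat, k < current.length ∧ current[k]? = some "module" ∧
    c = current.take k ++ current.drop (k + 1)

def OneStepR (current c : List String) : Prop := OneStep0 current c ∧ c ≠ []

theorem strip_refl (a : List String) : Strip a a := by
  induction a with
  | nil => exact Strip.nil
  | cons s xs ih => exact Strip.keep s ih

theorem strip_length {a c : List String} (h : Strip a c) : c.length ≤ a.length := by
  induction h with
  | nil => simp
  | keep s _ ih => simpa using ih
  | drop _ ih => simp; omega

theorem strip_trans {a b c : List String} (hab : Strip a b) (hbc : Strip b c) : Strip a c := by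
  induction hab generalizing c with
  | nil => exact hbc
  | keep s h ih =>
    cases hbc with
    | keep _ h2 => exact Strip.keep s (ih h2)
    | drop h2 => exact Strip.drop (ih h2)
  | drop h ih => exact Strip.drop (ih hbc)

theorem strip_onestep {current c : List String} (h : OneStep0 current c) : Strip current c := by
  obtain ⟨k, hk, hget, hc⟩ := h
  subst hc
  induction current generalizing k with
  | nil => simp at hk
  | cons s rest ih =>
    cases k with
    | zero =>
      simp at hget
      subst hget
      simpa using Strip.drop (strip_refl rest)
    | succ k =>
      simp at hget hk
      simpa [List.take_succ_cons, List.drop_succ_cons] using Strip.keep s (ih k hk hget)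

-- a strict stripping factors through a one-element-longer stripping
theorem strip_decompose {a c : List String} (h : Strip a c) (hne : c ≠ a) :
    ∃ c', Strip a c' ∧ c'.length = c.length + 1 ∧ OneStep0 c' c := by
  induction h with
  | nil => exact absurd rfl hne
  | @keep s xs c hxc ih =>
    have hcx : c ≠ xs := by intro h; exact hne (by rw [h])
    obtain ⟨c', h1, hlen, k, hk, hget, hc⟩ := ih hcx
    refine ⟨s :: c', Strip.keep s h1, by simp [hlen], k + 1, by simpa using hk, by simpa using hget, ?_⟩
    simp [List.take_succ_cons, List.drop_succ_cons, hc]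
  | @drop xs c hxc =>
    exact ⟨"module" :: c, Strip.keep "module" hxc, by simp, 0, by simp, by simp, by simp⟩

-- membership behaviour of the inner loop
theorem innerA_spec (ps : List (Int × String)) (current : List String)
    (seen : PySem.Set (List String)) (variants : PySem.Set String) (pushed : List (List String))
    (hps : ∀ p ∈ ps, ∃ k : Nat, ∃ _ : k < current.length, p = ((k : Int), current[k])) :
    ∃ new : List (List String),
      (innerA ps current seen variants pushed).2.2 = pushed ++ new ∧
      (∀ c, c ∈ (innerA ps current seen variants pushed).1 ↔ c ∈ seen ∨ c ∈ new) ∧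
      (∀ x, x ∈ (innerA ps current seen variants pushed).2.1 ↔
        x ∈ variants ∨ ∃ c ∈ new, x = PySem.Str.join "." c) ∧
      (∀ c ∈ new, OneStepR current c) ∧
      (∀ p ∈ ps, p.2 = "module" → ∀ k : Nat, p.1 = (k : Int) → k < current.length →
        current.take k ++ current.drop (k + 1) ≠ [] →
        current.take k ++ current.drop (k + 1) ∈ (innerA ps current seen variants pushed).1) := by
  induction ps generalizing seen variants pushed with
  | nil =>
    exact ⟨[], by simp [innerA], fun c => by simp [innerA], fun x => by simp [innerA],
      by simp, by simp⟩
  | cons p ps ih =>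
    obtain ⟨index, segment⟩ := p
    obtain ⟨k, hk, hpk⟩ := hps (index, segment) (List.mem_cons_self ..)
    rw [Prod.ext_iff] at hpk
    obtain ⟨hik, hsk⟩ := hpk
    simp only at hik hsk
    have hps' : ∀ p ∈ ps, ∃ k : Nat, ∃ _ : k < current.length, p = ((k : Int), current[k]) :=
      fun p hp => hps p (List.mem_cons_of_mem _ hp)
    simp only [innerA, hik, candidate_eq]
    split_ifs with h1 h2 h3
    · -- segment ≠ "module": plain recursion
      obtain ⟨new, ha, hb, hc, hd, he⟩ := ih seen variants pushed hps'
      refine ⟨new, ha, hb, hc, hd, ?_⟩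
      intro p hp0
      rcases List.mem_cons.mp hp0 with hp | hp
      · intro hmod
        rw [hp] at hmod
        simp only at hmod
        exact absurd hmod h1
      · exact he p hp
    · -- empty candidate skipped
      obtain ⟨new, ha, hb, hc, hd, he⟩ := ih seen variants pushed hps'
      refine ⟨new, ha, hb, hc, hd, ?_⟩
      intro p hp0
      rcases List.mem_cons.mp hp0 with hp | hp
      · intro _ k' hk' hklt hne
        rw [hp] at hk'
        simp only at hk'
        rw [show k' = k by exact_mod_cast hk'.symm] at hne
        exact absurd h2 hne
      · exact he p hp
    · -- already seen: skipped, but the candidate is in seen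
      obtain ⟨new, ha, hb, hc, hd, he⟩ := ih seen variants pushed hps'
      refine ⟨new, ha, hb, hc, hd, ?_⟩
      intro p hp0
      rcases List.mem_cons.mp hp0 with hp | hp
      · intro _ k' hk' hklt hne
        rw [hp] at hk'
        simp only at hk'
        rw [show k' = k by exact_mod_cast hk'.symm]
        exact (hb _).mpr (Or.inl (PySem.Set.contains_iff _ _ |>.mp h3))
      · exact he p hp
    · -- fresh candidate: added to seen, variants and pushed
      rw [not_ne_iff] at h1
      obtain ⟨new, ha, hb, hc, hd, he⟩ :=
        ih (PySem.Set.add seen (current.take k ++ current.drop (k + 1)))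
          (PySem.Set.add variants
            (PySem.Str.join "." (current.take k ++ current.drop (k + 1))))
          (pushed ++ [current.take k ++ current.drop (k + 1)]) hps'
      refine ⟨(current.take k ++ current.drop (k + 1)) :: new, ?_, ?_, ?_, ?_, ?_⟩
      · rw [ha]; simp
      · intro c
        rw [hb, PySem.Set.mem_add]
        simp only [List.mem_cons]
        tauto
      · intro x
        rw [hc, PySem.Set.mem_add]
        constructor
        · rintro ((hx | hx) | ⟨d, hd', rfl⟩)
          · exact Or.inl hx
          · exact Or.inr ⟨_, List.mem_cons_self .., hx⟩
          · exact Or.inr ⟨d, List.mem_cons_of_mem _ hd', rfl⟩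
        · rintro (hx | ⟨d, hd', rfl⟩)
          · exact Or.inl (Or.inl hx)
          · rcases List.mem_cons.mp hd' with hdeq | hd''
            · exact Or.inl (Or.inr (by rw [hdeq]))
            · exact Or.inr ⟨d, hd'', rfl⟩
      · intro c hc0
        rcases List.mem_cons.mp hc0 with hceq | hcn
        · subst hceq
          refine ⟨⟨k, hk, ?_, rfl⟩, h2⟩
          rw [List.getElem?_eq_getElem hk, ← hsk, h1]
        · exact hd c hcn
      · intro p hp0
        rcases List.mem_cons.mp hp0 with hp | hp
        · intro _ k' hk' hklt hne
          rw [hp] at hk'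
          simp only at hk'
          rw [show k' = k by exact_mod_cast hk'.symm]
          exact (hb _).mpr (Or.inl ((PySem.Set.mem_add _ _ _).mpr (Or.inr rfl)))
        · exact he p hp

theorem innerA_nodup (ps : List (Int × String)) (current : List String)
    (seen : PySem.Set (List String)) (variants : PySem.Set String) (pushed : List (List String))
    (h : variants.Nodup) : (innerA ps current seen variants pushed).2.1.Nodup := by
  induction ps generalizing seen variants pushed with
  | nil => simpa [innerA] using h
  | cons p ps ih =>
    obtain ⟨index, segment⟩ := p
    simp only [innerA]
    split_ifs with h1 h2 h3
    · exact ih _ _ _ h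
    · exact ih _ _ _ h
    · exact ih _ _ _ h
    · exact ih _ _ _ (PySem.Set.nodup_add _ _ h)

theorem loopA_nodup (frontier : List (List String)) (seen : PySem.Set (List String))
    (variants : PySem.Set String) (h : variants.Nodup) :
    (loopA frontier seen variants).Nodup := by
  induction frontier, seen, variants using loopA.induct with
  | case1 seen variants => simpa [loopA] using h
  | case2 seen variants f fs current rest r ih =>
    rw [loopA]
    exact ih (innerA_nodup _ _ _ _ _ h)

def SatA (seen : PySem.Set (List String)) (frontier : List (List String)) : Prop :=
  ∀ c ∈ seen, c ∉ frontier → ∀ d, OneStepR c d → d ∈ seen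

theorem loopA_spec (segs : List String) (frontier : List (List String))
    (seen : PySem.Set (List String)) (variants : PySem.Set String)
    (hI1 : ∀ c ∈ seen, Strip segs c ∧ c ≠ [])
    (hI2 : ∀ c ∈ frontier, c ∈ seen)
    (hI3 : ∀ x, x ∈ variants ↔ ∃ c ∈ seen, x = PySem.Str.join "." c)
    (hSat : SatA seen frontier) :
    ∃ S : List (List String),
      (∀ x, x ∈ loopA frontier seen variants ↔ ∃ c ∈ S, x = PySem.Str.join "." c) ∧
      (∀ c ∈ seen, c ∈ S) ∧
      (∀ c ∈ S, Strip segs c ∧ c ≠ []) ∧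
      (∀ c ∈ S, ∀ d, OneStepR c d → d ∈ S) := by
  induction frontier, seen, variants using loopA.induct with
  | case1 seen variants =>
    refine ⟨seen, ?_, fun c hc => hc, hI1, ?_⟩
    · intro x
      rw [loopA]
      exact hI3 x
    · intro c hc d hd
      exact hSat c hc (by simp) d hd
  | case2 seen variants f fs current rest r ih =>
    have hfr : rest ++ [current] = f :: fs :=
      List.dropLast_append_getLast (by simp : f :: fs ≠ [])
    have hps : ∀ p ∈ PySem.List.enumerate current 0,
        ∃ k : Nat, ∃ _ : k < current.length, p = ((k : Int), current[k]) := by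
      intro p hp
      rw [PySem.List.mem_enumerate_iff] at hp
      obtain ⟨k, hk, rfl⟩ := hp
      exact ⟨k, hk, by simp⟩
    obtain ⟨new, ha, hb, hc, hd, he⟩ := innerA_spec _ current seen variants [] hps
    have hcur_mem : current ∈ seen := hI2 current (by rw [← hfr]; simp)
    have hcur_strip : Strip segs current ∧ current ≠ [] := hI1 current hcur_mem
    have hI1' : ∀ c ∈ r.1, Strip segs c ∧ c ≠ [] := by
      intro c hcin
      rcases (hb c).mp hcin with h | h
      · exact hI1 c h
      · obtain ⟨h0, hne⟩ := hd c h
        exact ⟨strip_trans hcur_strip.1 (strip_onestep h0), hne⟩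
    have hI2' : ∀ c ∈ rest ++ r.2.2, c ∈ r.1 := by
      intro c hcin
      rcases List.mem_append.mp hcin with h | h
      · exact (hb c).mpr (Or.inl (hI2 c (by rw [← hfr]; exact List.mem_append_left _ h)))
      · rw [ha] at h
        simp only [List.nil_append] at h
        exact (hb c).mpr (Or.inr h)
    have hI3' : ∀ x, x ∈ r.2.1 ↔ ∃ c ∈ r.1, x = PySem.Str.join "." c := by
      intro x
      rw [hc x]
      constructor
      · rintro (hx | ⟨d, hdn, rfl⟩)
        · obtain ⟨d, hds, rfl⟩ := (hI3 x).mp hx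
          exact ⟨d, (hb d).mpr (Or.inl hds), rfl⟩
        · exact ⟨d, (hb d).mpr (Or.inr hdn), rfl⟩
      · rintro ⟨d, hdr, rfl⟩
        rcases (hb d).mp hdr with h | h
        · exact Or.inl ((hI3 _).mpr ⟨d, h, rfl⟩)
        · exact Or.inr ⟨d, h, rfl⟩
    have hSat' : SatA r.1 (rest ++ r.2.2) := by
      intro c hcin hnotin d hstep
      rcases (hb c).mp hcin with h | h
      · by_cases hcf : c ∈ (f :: fs)
        · have hcur : c = current := by
            rw [← hfr] at hcf
            rcases List.mem_append.mp hcf with h' | h'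
            · exact absurd (List.mem_append_left _ h') hnotin
            · simpa using h'
          subst hcur
          obtain ⟨⟨kd, hkd, hgetd, hdd⟩, hne⟩ := hstep
          have hgd : current[kd] = "module" := by
            rw [List.getElem?_eq_getElem hkd] at hgetd
            exact Option.some.inj hgetd
          have := he ((kd : Int), current[kd])
            (by rw [PySem.List.mem_enumerate_iff]; exact ⟨kd, hkd, by simp⟩)
            (by simpa using hgd) kd (by simp) hkd (by rw [← hdd]; exact hne)
          rw [← hdd] at this
          exact this
        · exact (hb d).mpr (Or.inl (hSat c h hcf d hstep))
      · exact absurd (List.mem_append_right _ (by rw [ha]; simpa using h)) hnotin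
    obtain ⟨S, hS1, hS2, hS3, hS4⟩ := ih hI1' hI2' hI3' hSat'
    refine ⟨S, ?_, fun c hcs => hS2 c ((hb c).mpr (Or.inl hcs)), hS3, hS4⟩
    intro x
    rw [loopA]
    exact hS1 x

-- completeness of the closure: every nonempty stripping of segs is in a closed S containing segs
theorem strip_complete (segs : List String) (S : List (List String))
    (hseg : segs ∈ S) (hclosed : ∀ c ∈ S, ∀ d, OneStepR c d → d ∈ S)
    (c : List String) (hc : Strip segs c) (hne : c ≠ []) : c ∈ S := by
  have main : ∀ n c, Strip segs c → c ≠ [] → segs.length - c.length = n → c ∈ S := by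
    intro n
    induction n using Nat.strong_induction_on with
    | _ n ih =>
      intro c hc hne hlen
      by_cases hceq : c = segs
      · exact hceq ▸ hseg
      · obtain ⟨c', h1, hl, hstep⟩ := strip_decompose hc hceq
        have hle : c'.length ≤ segs.length := strip_length h1
        have hc' : c' ∈ S := ih (segs.length - c'.length) (by omega) c' h1
          (by intro h; rw [h] at hl; simp at hl) rfl
        exact hclosed c' hc' c ⟨hstep, hne⟩
  exact main (segs.length - c.length) c hc hne rfl

-- B-side characterizations
theorem mem_expansionsB (l c : List String) : c ∈ expansionsB l ↔ Strip l c := by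
  induction l generalizing c with
  | nil =>
    simp only [expansionsB, List.mem_singleton]
    constructor
    · rintro rfl; exact Strip.nil
    · intro h; cases h; rfl
  | cons s rest' ih =>
    simp only [expansionsB]
    by_cases hs : s = "module"
    · subst hs
      rw [if_pos rfl]
      simp only [List.mem_append, List.mem_map]
      constructor
      · rintro (⟨t, ht, rfl⟩ | h)
        · exact Strip.keep _ ((ih t).mp ht)
        · exact Strip.drop ((ih c).mp h)
      · intro h
        cases h with
        | keep _ h2 => exact Or.inl ⟨_, (ih _).mpr h2, rfl⟩
        | drop h2 => exact Or.inr ((ih c).mpr h2)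
    · rw [if_neg hs]
      simp only [List.mem_map]
      constructor
      · rintro ⟨t, ht, rfl⟩; exact Strip.keep _ ((ih t).mp ht)
      · intro h
        cases h with
        | keep _ h2 => exact ⟨_, (ih _).mpr h2, rfl⟩
        | drop h2 => exact absurd rfl hs

theorem mem_Bfold (l : List (List String)) (s : PySem.Set String) (x : String) :
    x ∈ l.foldl (fun acc c => if c ≠ [] then PySem.Set.add acc (PySem.Str.join "." c) else acc) s ↔
      x ∈ s ∨ ∃ c ∈ l, c ≠ [] ∧ x = PySem.Str.join "." c := by
  induction l generalizing s with
  | nil => simp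
  | cons c l ih =>
    by_cases hc : c = []
    · subst hc
      simp only [List.foldl_cons, ne_eq, not_true_eq_false, if_false, ih, List.mem_cons]
      constructor
      · rintro (h | ⟨d, hd, h1, h2⟩)
        · exact Or.inl h
        · exact Or.inr ⟨d, Or.inr hd, h1, h2⟩
      · rintro (h | ⟨d, (rfl | hd), h1, h2⟩)
        · exact Or.inl h
        · exact absurd rfl h1
        · exact Or.inr ⟨d, hd, h1, h2⟩
    · simp only [List.foldl_cons, ne_eq, hc, not_false_eq_true, if_true, ih,
        PySem.Set.mem_add, List.mem_cons]
      constructor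
      · rintro ((h | h) | ⟨d, hd, h1, h2⟩)
        · exact Or.inl h
        · exact Or.inr ⟨c, Or.inl rfl, hc, h⟩
        · exact Or.inr ⟨d, Or.inr hd, h1, h2⟩
      · rintro (h | ⟨d, (rfl | hd), h1, h2⟩)
        · exact Or.inl (Or.inl h)
        · exact Or.inl (Or.inr h2)
        · exact Or.inr ⟨d, hd, h1, h2⟩

theorem nodup_Bfold (l : List (List String)) (s : PySem.Set String) (h : s.Nodup) :
    (l.foldl (fun acc c => if c ≠ [] then PySem.Set.add acc (PySem.Str.join "." c) else acc)
      s).Nodup := by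
  induction l generalizing s with
  | nil => exact h
  | cons c l ih =>
    simp only [List.foldl_cons]
    split
    · exact ih _ (PySem.Set.nodup_add s _ h)
    · exact ih _ h

-- split/join roundtrip for the literal separator "."
theorem go_ne_nil (sep : List Char) (fuel : Nat) (l cur : List Char) (acc : List (List Char)) :
    PySem.Chars.splitOn.go sep fuel l cur acc ≠ [] := by
  induction fuel generalizing l cur acc with
  | zero => rw [PySem.Chars.splitOn.go]; simp
  | succ fuel ih =>
    cases l with
    | nil => rw [PySem.Chars.splitOn.go] <;> simp
    | cons c rest =>
      rw [PySem.Chars.splitOn.go]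
      split
      · exact ih _ _ _
      · exact ih _ _ _

theorem go_acc (sep : List Char) (fuel : Nat) (l cur : List Char) (acc : List (List Char)) :
    PySem.Chars.splitOn.go sep fuel l cur acc =
      acc.reverse ++ PySem.Chars.splitOn.go sep fuel l cur [] := by
  induction fuel generalizing l cur acc with
  | zero => rw [PySem.Chars.splitOn.go, PySem.Chars.splitOn.go]; simp
  | succ fuel ih =>
    cases l with
    | nil => rw [PySem.Chars.splitOn.go, PySem.Chars.splitOn.go] <;> simp
    | cons c rest =>
      rw [PySem.Chars.splitOn.go]
      conv_rhs => rw [PySem.Chars.splitOn.go]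
      split
      · rw [ih _ _ (cur.reverse :: acc), ih _ _ [cur.reverse]]
        simp
      · exact ih _ _ _

theorem join_go (sep : List Char) (hsep : sep ≠ []) (fuel : Nat) (l cur : List Char)
    (hfuel : l.length ≤ fuel) :
    PySem.Chars.join sep (PySem.Chars.splitOn.go sep fuel l cur []) = cur.reverse ++ l := by
  induction fuel generalizing l cur with
  | zero =>
    have : l = [] := by cases l <;> simp_all
    subst this
    rw [PySem.Chars.splitOn.go]
    simp [PySem.Chars.join_singleton]
  | succ fuel ih =>
    cases l with
    | nil =>
      rw [PySem.Chars.splitOn.go] <;> simp [PySem.Chars.join_singleton]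
    | cons c rest =>
      rw [PySem.Chars.splitOn.go]
      split
      · rename_i hp
        have hpre : sep <+: (c :: rest) := by
          rwa [← List.isPrefixOf_iff_prefix]
        obtain ⟨t, ht⟩ := hpre
        have hdrop : (c :: rest).drop sep.length = t := by
          rw [← ht]; simp
        rw [go_acc, hdrop]
        have hG := go_ne_nil sep fuel t [] []
        obtain ⟨q, G, hqG⟩ := List.exists_cons_of_ne_nil hG
        rw [hqG]
        have hlen : t.length ≤ fuel := by
          have := congrArg List.length ht
          simp at this
          cases sep with
          | nil => exact absurd rfl hsep
          | cons a b => simp at this hfuel ⊢; omega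
        have := ih t [] hlen
        rw [hqG] at this
        simp only [List.reverse_nil, List.nil_append] at this
        simp only [List.reverse_cons, List.reverse_nil, List.nil_append]
        rw [show ([cur.reverse] : List (List Char)) ++ q :: G = cur.reverse :: q :: G from rfl,
          PySem.Chars.join_cons_cons]
        rw [this, show c :: rest = sep ++ t from ht.symm]
        simp
      · rw [ih rest (c :: cur) (by simpa using Nat.le_of_succ_le_succ (by simpa using hfuel))]
        simp
theorem splitDot_eq (key : String) :
    splitDot key = (PySem.Chars.splitOn key.toList ['.']).map String.ofList := by
  simp [splitDot, PySem.Str.split?, PySem.Chars.split?]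

theorem splitDot_ne_nil (key : String) : splitDot key ≠ [] := by
  rw [splitDot_eq]
  simp only [ne_eq, List.map_eq_nil_iff]
  rw [PySem.Chars.splitOn]
  exact go_ne_nil _ _ _ _ _

theorem join_splitDot (key : String) : PySem.Str.join "." (splitDot key) = key := by
  have h1 : (PySem.Str.join "." (splitDot key)).toList = key.toList := by
    rw [PySem.Str.toList_join, splitDot_eq]
    rw [List.map_map]
    have : String.toList ∘ String.ofList = id := by
      funext l; simp [String.toList_ofList]
    rw [this, List.map_id]
    have hsep : (".".toList : List Char) = ['.'] := rfl
    rw [hsep, PySem.Chars.splitOn]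
    rw [join_go ['.'] (by simp) _ _ [] (by omega)]
    simp
  have := congrArg String.ofList h1
  rwa [String.ofList_toList, String.ofList_toList] at this

-- ===== VERDICT (by name: the statement is the Claim_ definition above) =====
theorem module_stripped_variants_py_spec : Claim_equal_module_stripped_variants_py := by
  intro key _
  show PySem.List.sorted
      (loopA [splitDot key] (PySem.Set.ofList [splitDot key]) (PySem.Set.ofList [key]))
      (fun x => x) false
    = PySem.List.sorted
      ((expansionsB (splitDot key)).foldl
        (fun acc c => if c ≠ [] then PySem.Set.add acc (PySem.Str.join "." c) else acc)
        PySem.Set.empty)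
      (fun x => x) false
  obtain ⟨S, hS1, hS2, hS3, hS4⟩ := loopA_spec (splitDot key) [splitDot key]
    (PySem.Set.ofList [splitDot key]) (PySem.Set.ofList [key])
    (by
      intro c hc
      rw [PySem.Set.mem_ofList, List.mem_singleton] at hc
      subst hc
      exact ⟨strip_refl _, splitDot_ne_nil key⟩)
    (by
      intro c hc
      rw [PySem.Set.mem_ofList]
      exact hc)
    (by
      intro x
      rw [PySem.Set.mem_ofList, List.mem_singleton]
      constructor
      · intro hx
        refine ⟨splitDot key, by rw [PySem.Set.mem_ofList]; exact List.mem_singleton_self _, ?_⟩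
        rw [hx, join_splitDot]
      · rintro ⟨c, hc, rfl⟩
        rw [PySem.Set.mem_ofList, List.mem_singleton] at hc
        subst hc
        exact join_splitDot key)
    (by
      intro c hc hnc d hd
      rw [PySem.Set.mem_ofList, List.mem_singleton] at hc
      exact absurd (List.mem_singleton.mpr hc) hnc)
  apply (PySem.List.sorted_id_eq_sorted_id_iff_perm _ _).mpr
  apply (List.perm_ext_iff_of_nodup
    (loopA_nodup _ _ _ (PySem.Set.nodup_ofList _))
    (nodup_Bfold _ _ List.nodup_nil)).mpr
  intro x
  rw [hS1 x, mem_Bfold]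
  constructor
  · rintro ⟨c, hcS, rfl⟩
    obtain ⟨hstrip, hne⟩ := hS3 c hcS
    exact Or.inr ⟨c, (mem_expansionsB _ c).mpr hstrip, hne, rfl⟩
  · rintro (hx | ⟨c, hcE, hne, rfl⟩)
    · exact absurd hx (List.not_mem_nil)
    · refine ⟨c, ?_, rfl⟩
      refine strip_complete (splitDot key) S ?_ hS4 c ((mem_expansionsB _ c).mp hcE) hne
      exact hS2 (splitDot key) (by rw [PySem.Set.mem_ofList]; exact List.mem_singleton_self _)
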